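-- pv_equiv track=rewrite | github.com/marbul33/abaco | src/ui.py | validar_pulsacion
-- ===== SOURCE A (Python) =====
-- def validar_pulsacion(texto_propuesto):
--     """
--     Validador para campos monetarios con decimales y signo +/-.
--     Permite: dígitos, un punto decimal, coma (→ punto), apóstrofe (→ punto),
--     y un signo + o - al inicio. Limita a 6 enteros y 2 decimales.
--     """
--     if texto_propuesto in ("", "+", "-"):
--         return True
--
--     # Normalizar separadores decimales alternativos
--     t_norm = texto_propuesto.replace(',', '.').replace("'", '.')
--
--     if t_norm.count('.') > 1:
--         return False
--
--     # Analizar solo la parte numérica (sin el signo inicial)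
--     t_eval = t_norm[1:] if t_norm.startswith(('+', '-')) else t_norm
--
--     for char in t_eval:
--         if not char.isdigit() and char != '.':
--             return False
--
--     partes = t_eval.split('.')
--     if len(partes[0]) > 6:
--         return False
--     if len(partes) > 1 and len(partes[1]) > 2:
--         return False
--
--     return True
-- ===== SOURCE B (Python) =====
-- def validar_pulsacion(texto_propuesto):
--     """Single left-to-right scan: sign allowed only at index 0, one decimal
--     separator (.,'), digit counters before/after it, limits 6/2."""
--     seen_dot = False
--     int_digits = 0
--     dec_digits = 0
--     for i, char in enumerate(texto_propuesto):
--         if i == 0 and char in "+-":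
--             continue
--         if char in ".,'":
--             if seen_dot:
--                 return False
--             seen_dot = True
--         elif char.isdigit():
--             if seen_dot:
--                 dec_digits += 1
--             else:
--                 int_digits += 1
--         else:
--             return False
--     return int_digits <= 6 and dec_digits <= 2
-- ===== Notes on version B (the rewrite author's own statement) =====
-- stated objective: simpler
-- what changed: A normalizes separators with two string replaces, counts dots, strips the sign, re-scans all characters and splits on the dot to measure the parts; B is one left-to-right scan that skips a leading sign, tracks a seen-dot flag and two digit counters, with no intermediate strings.
import Mathlib
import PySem

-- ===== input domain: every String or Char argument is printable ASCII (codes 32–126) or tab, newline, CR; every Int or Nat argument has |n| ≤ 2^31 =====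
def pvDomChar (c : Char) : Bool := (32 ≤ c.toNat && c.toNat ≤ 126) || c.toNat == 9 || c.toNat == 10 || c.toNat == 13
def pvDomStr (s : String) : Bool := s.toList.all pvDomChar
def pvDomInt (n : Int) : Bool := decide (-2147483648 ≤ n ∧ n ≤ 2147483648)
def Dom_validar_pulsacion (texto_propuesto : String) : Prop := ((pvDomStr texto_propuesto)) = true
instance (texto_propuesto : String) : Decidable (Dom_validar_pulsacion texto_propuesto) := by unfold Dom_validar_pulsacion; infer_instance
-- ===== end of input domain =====

-- B replaces A's normalize/count/split pipeline by one left-to-right scan with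
-- a seen-dot flag and two digit counters (objective: simpler, one pass, no
-- intermediate strings); same return value on every input.

-- ===== PORT A =====
def validar_pulsacion (texto_propuesto : String) : Bool :=
  if texto_propuesto = "" ∨ texto_propuesto = "+" ∨ texto_propuesto = "-" then true
  else
    let t_norm := PySem.Str.replace (PySem.Str.replace texto_propuesto "," ".") "'" "."
    if PySem.Str.count t_norm "." > 1 then false
    else
      let t_eval :=
        if PySem.Str.startswith t_norm "+" || PySem.Str.startswith t_norm "-" then
          PySem.Str.slice t_norm (some 1) none
        else t_norm
      -- for char in t_eval: if not char.isdigit() and char != '.': return False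
      if t_eval.toList.any (fun char => !(PySem.Chars.isdigit char) && char != '.') then false
      else
        let partes := PySem.Chars.splitOn t_eval.toList ['.']
        if (partes.headD []).length > 6 then false
        else if partes.length > 1 && (partes.getD 1 []).length > 2 then false
        else true

-- ===== PORT B =====
-- the scan: seen_dot flag, int/dec digit counters (Source B's loop body)
def pvAltLoop : List Char → Bool → Nat → Nat → Bool
  | [], _, int_digits, dec_digits => decide (int_digits ≤ 6) && decide (dec_digits ≤ 2)
  | char :: rest, seen_dot, int_digits, dec_digits =>
    if char = '.' ∨ char = ',' ∨ char = '\'' then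
      cond seen_dot false (pvAltLoop rest true int_digits dec_digits)
    else if PySem.Chars.isdigit char then
      cond seen_dot (pvAltLoop rest seen_dot int_digits (dec_digits + 1))
                    (pvAltLoop rest seen_dot (int_digits + 1) dec_digits)
    else false

def validar_pulsacion_alt (texto_propuesto : String) : Bool :=
  -- i == 0 and char in "+-": skip the leading sign, then scan the rest
  match texto_propuesto.toList with
  | [] => pvAltLoop [] false 0 0
  | char :: rest =>
    if char = '+' ∨ char = '-' then pvAltLoop rest false 0 0
    else pvAltLoop (char :: rest) false 0 0

-- ===== PRECONDITION & SPEC =====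
def Spec_validar_pulsacion (texto_propuesto : String) (out : Bool) : Prop := out = validar_pulsacion_alt texto_propuesto
instance (texto_propuesto : String) (out : Bool) : Decidable (Spec_validar_pulsacion texto_propuesto out) := by unfold Spec_validar_pulsacion; infer_instance

-- ===== CLAIM (what is proved, stated in full; the proofs are below) =====
def Claim_equal_validar_pulsacion : Prop := ∀ (texto_propuesto : String), Dom_validar_pulsacion texto_propuesto → Spec_validar_pulsacion texto_propuesto (validar_pulsacion texto_propuesto)

-- ===== LEMMAS AND PROOFS =====

-- normalization applied by A: ',' and '\'' become '.'
def pvNorm (c : Char) : Char := if c = ',' then '.' else if c = '\'' then '.' else c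

-- B's separator test
def pvSep (c : Char) : Bool := c = '.' ∨ c = ',' ∨ c = '\''

-- spec of Chars.splitOn for a single-character separator
def pvSplit1 (a : Char) : List Char → List Char → List (List Char)
  | [], cur => [cur.reverse]
  | c :: t, cur => if c = a then cur.reverse :: pvSplit1 a t [] else pvSplit1 a t (c :: cur)

theorem pv_replace_go (a b : Char) (l : List Char) (acc : List Char) (fuel : Nat)
    (h : l.length ≤ fuel) :
    PySem.Chars.replace.go [a] [b] fuel l acc
      = acc.reverse ++ l.map (fun c => if c = a then b else c) := by
  induction l generalizing acc fuel with
  | nil => cases fuel <;> simp [PySem.Chars.replace.go]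
  | cons c t ih =>
    cases fuel with
    | zero => simp at h
    | succ n =>
      simp only [PySem.Chars.replace.go, List.isPrefixOf, List.isPrefixOf_nil_left]
      by_cases hc : c = a
      · subst hc
        simp only [beq_self_eq_true, Bool.true_and, if_pos, List.length_cons,
          List.length_nil, List.drop_succ_cons, List.drop_zero]
        rw [ih _ n (by simpa using h)]
        simp
      · have : (a == c) = false := beq_eq_false_iff_ne.mpr (fun h' => hc (Eq.symm h'))
        simp only [this, Bool.false_and, if_neg Bool.false_ne_true]
        rw [ih _ n (by simpa using h)]
        simp [hc]

theorem pv_replace_single (a b : Char) (l : List Char) :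
    PySem.Chars.replace l [a] [b] = l.map (fun c => if c = a then b else c) := by
  simp [PySem.Chars.replace, pv_replace_go a b l [] l.length le_rfl]

theorem pv_count_go (a : Char) (l : List Char) (acc : Nat) (fuel : Nat)
    (h : l.length ≤ fuel) :
    PySem.Chars.count.go [a] fuel l acc = acc + l.count a := by
  induction l generalizing acc fuel with
  | nil => cases fuel <;> simp [PySem.Chars.count.go]
  | cons c t ih =>
    cases fuel with
    | zero => simp at h
    | succ n =>
      simp only [PySem.Chars.count.go, List.isPrefixOf, List.isPrefixOf_nil_left]
      by_cases hc : c = a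
      · subst hc
        simp only [beq_self_eq_true, Bool.true_and, if_pos, List.length_cons,
          List.length_nil, List.drop_succ_cons, List.drop_zero]
        rw [ih _ n (by simpa using h)]
        simp [List.count_cons]
        omega
      · have : (a == c) = false := beq_eq_false_iff_ne.mpr (fun h' => hc (Eq.symm h'))
        simp only [this, Bool.false_and, if_neg Bool.false_ne_true]
        rw [ih _ n (by simpa using h)]
        simp [List.count_cons, hc]

theorem pv_count_single (a : Char) (l : List Char) :
    PySem.Chars.count l [a] = l.count a := by
  simp [PySem.Chars.count, pv_count_go a l 0 l.length le_rfl]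

theorem pv_splitOn_go (a : Char) (l cur : List Char) (acc : List (List Char)) (fuel : Nat)
    (h : l.length < fuel) :
    PySem.Chars.splitOn.go [a] fuel l cur acc = acc.reverse ++ pvSplit1 a l cur := by
  induction l generalizing cur acc fuel with
  | nil =>
    cases fuel with
    | zero => omega
    | succ n => simp [PySem.Chars.splitOn.go, pvSplit1]
  | cons c t ih =>
    cases fuel with
    | zero => omega
    | succ n =>
      simp only [PySem.Chars.splitOn.go, List.isPrefixOf, List.isPrefixOf_nil_left]
      by_cases hc : c = a
      · subst hc
        simp only [beq_self_eq_true, Bool.true_and, if_pos, List.length_cons,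
          List.length_nil, List.drop_succ_cons, List.drop_zero]
        rw [ih _ _ n (by simpa using h)]
        simp [pvSplit1]
      · have : (a == c) = false := beq_eq_false_iff_ne.mpr (fun h' => hc (Eq.symm h'))
        simp only [this, Bool.false_and, if_neg Bool.false_ne_true]
        rw [ih _ _ n (by simpa using h)]
        simp [pvSplit1, hc]

theorem pv_splitOn_single (a : Char) (l : List Char) :
    PySem.Chars.splitOn l [a] = pvSplit1 a l [] := by
  simp [PySem.Chars.splitOn, pv_splitOn_go a l [] [] (l.length + 1) (by omega)]

theorem pv_split1_eq (a : Char) (l : List Char) (cur : List Char) :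
    pvSplit1 a l cur
      = (cur.reverse ++ l.takeWhile (fun c => c ≠ a))
        :: (if a ∈ l then pvSplit1 a ((l.dropWhile (fun c => c ≠ a)).tail) [] else []) := by
  induction l generalizing cur with
  | nil => simp [pvSplit1]
  | cons c t ih =>
    by_cases hc : c = a
    · simp [pvSplit1, hc, List.takeWhile_cons, List.dropWhile_cons]
    · have hmem : a ∈ c :: t ↔ a ∈ t := by
        simp [List.mem_cons, (Ne.symm hc : a ≠ c)]
      simp only [pvSplit1, if_neg hc]
      rw [ih]
      simp [List.takeWhile_cons, List.dropWhile_cons, hc, hmem]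
  
-- pointwise facts about pvNorm
theorem pv_norm_eq_dot_iff (c : Char) : pvNorm c = '.' ↔ pvSep c = true := by
  unfold pvNorm pvSep
  by_cases h1 : c = ',' <;> by_cases h2 : c = '\'' <;> simp [h1, h2] <;> tauto

theorem pv_norm_digit_iff (c : Char) :
    (PySem.Chars.isdigit (pvNorm c) || pvNorm c = '.')
      = (PySem.Chars.isdigit c || pvSep c) := by
  unfold pvNorm pvSep
  by_cases h1 : c = ','
  · subst h1; decide
  · by_cases h2 : c = '\''
    · subst h2; decide
    · simp [h1, h2]

-- the common characterization both programs satisfy, over the sign-stripped char list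
def pvGood (bs : List Char) : Prop :=
  (∀ c ∈ bs, PySem.Chars.isdigit c = true ∨ pvSep c = true) ∧
  bs.countP pvSep ≤ 1 ∧
  (bs.takeWhile (fun c => !pvSep c)).length ≤ 6 ∧
  ((bs.dropWhile (fun c => !pvSep c)).tail).length ≤ 2

-- B's scan in the seen_dot = true state
theorem pv_altLoop_true (bs : List Char) (i d : Nat) :
    pvAltLoop bs true i d = true ↔
      (∀ c ∈ bs, PySem.Chars.isdigit c = true ∧ pvSep c = false) ∧ i ≤ 6 ∧ d + bs.length ≤ 2 := by
  induction bs generalizing d with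
  | nil => simp [pvAltLoop]
  | cons c t ih =>
    by_cases hs : pvSep c = true
    · have : c = '.' ∨ c = ',' ∨ c = '\'' := by simpa [pvSep] using hs
      simp only [pvAltLoop, if_pos this, Bool.cond_true]
      simp only [List.mem_cons]
      constructor
      · intro h; exact absurd h (by simp)
      · rintro ⟨hall, -⟩
        have := (hall c (Or.inl rfl)).2
        simp [hs] at this
    · have hnotsep : ¬ (c = '.' ∨ c = ',' ∨ c = '\'') := by simpa [pvSep] using hs
      by_cases hd : PySem.Chars.isdigit c = true
      · simp only [pvAltLoop, if_neg hnotsep, if_pos hd, Bool.cond_true]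
        rw [ih]
        simp only [List.mem_cons, List.length_cons]
        constructor
        · rintro ⟨hall, hi, hd2⟩
          refine ⟨?_, hi, by omega⟩
          rintro x (rfl | hx)
          · exact ⟨hd, by simpa using hs⟩
          · exact hall x hx
        · rintro ⟨hall, hi, hd2⟩
          exact ⟨fun x hx => hall x (Or.inr hx), hi, by omega⟩
      · simp only [pvAltLoop, if_neg hnotsep, if_neg hd]
        constructor
        · intro h; exact absurd h (by simp)
        · rintro ⟨hall, -⟩
          exact absurd (hall c (List.mem_cons_self)).1 hd

-- B's scan in the seen_dot = false state
theorem pv_altLoop_false (bs : List Char) (i d : Nat) :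
    pvAltLoop bs false i d = true ↔
      (∀ c ∈ bs, PySem.Chars.isdigit c = true ∨ pvSep c = true) ∧
      bs.countP pvSep ≤ 1 ∧
      i + (bs.takeWhile (fun c => !pvSep c)).length ≤ 6 ∧
      d + ((bs.dropWhile (fun c => !pvSep c)).tail).length ≤ 2 := by
  induction bs generalizing i with
  | nil => simp [pvAltLoop]
  | cons c t ih =>
    by_cases hs : pvSep c = true
    · have hc : c = '.' ∨ c = ',' ∨ c = '\'' := by simpa [pvSep] using hs
      simp only [pvAltLoop, if_pos hc, Bool.cond_false]
      rw [pv_altLoop_true]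
      have h1 : (c :: t).takeWhile (fun x => !pvSep x) = [] := by
        simp [List.takeWhile_cons, hs]
      have h2 : ((c :: t).dropWhile (fun x => !pvSep x)).tail = t := by
        simp [List.dropWhile_cons, hs]
      have h3 : (c :: t).countP pvSep = t.countP pvSep + 1 := by
        simp [List.countP_cons, hs]
      rw [h1, h2, h3]
      constructor
      · rintro ⟨hall, hi, hd2⟩
        refine ⟨?_, ?_, by simpa using hi, hd2⟩
        · intro x hx
          rcases List.mem_cons.mp hx with rfl | hx
          · exact Or.inr hs
          · exact Or.inl (hall x hx).1
        · have h0 : t.countP pvSep = 0 :=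
            List.countP_eq_zero.mpr (fun x hx => by simp [(hall x hx).2])
          omega
      · rintro ⟨hall, hcnt, hi, hd2⟩
        have h0 : t.countP pvSep = 0 := by omega
        rw [List.countP_eq_zero] at h0
        refine ⟨fun x hx => ?_, by simpa using hi, hd2⟩
        rcases hall x (List.mem_cons_of_mem _ hx) with h | h
        · exact ⟨h, by simpa using h0 x hx⟩
        · exact absurd h (by simpa using h0 x hx)
    · have hnotsep : ¬ (c = '.' ∨ c = ',' ∨ c = '\'') := by simpa [pvSep] using hs
      have hs' : pvSep c = false := by simpa using hs
      by_cases hd : PySem.Chars.isdigit c = true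
      · simp only [pvAltLoop, if_neg hnotsep, if_pos hd, Bool.cond_false]
        rw [ih]
        have h1 : (c :: t).takeWhile (fun x => !pvSep x)
            = c :: t.takeWhile (fun x => !pvSep x) := by
          simp [List.takeWhile_cons, hs']
        have h2 : (c :: t).dropWhile (fun x => !pvSep x)
            = t.dropWhile (fun x => !pvSep x) := by
          simp [List.dropWhile_cons, hs']
        have h3 : (c :: t).countP pvSep = t.countP pvSep := by
          simp [List.countP_cons, hs']
        rw [h1, h2, h3]
        constructor
        · rintro ⟨hall, hcnt, hi, hd2⟩
          refine ⟨?_, hcnt, by simp only [List.length_cons]; omega, hd2⟩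
          intro x hx
          rcases List.mem_cons.mp hx with rfl | hx
          · exact Or.inl hd
          · exact hall x hx
        · rintro ⟨hall, hcnt, hi, hd2⟩
          refine ⟨fun x hx => hall x (List.mem_cons_of_mem _ hx), hcnt, ?_, hd2⟩
          simp only [List.length_cons] at hi
          omega
      · simp only [pvAltLoop, if_neg hnotsep, if_neg hd]
        constructor
        · intro h; exact absurd h (by simp)
        · rintro ⟨hall, -⟩
          rcases hall c List.mem_cons_self with h | h
          · exact absurd h hd
          · exact absurd h (by simpa using hs)

-- B = true iff pvGood of the sign-stripped list
theorem pv_alt_iff (s : String) :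
    validar_pulsacion_alt s = true ↔
      pvGood (match s.toList with
              | [] => ([] : List Char)
              | c :: rest => if c = '+' ∨ c = '-' then rest else c :: rest) := by
  unfold validar_pulsacion_alt pvGood
  cases hs : s.toList with
  | nil => simp [pvAltLoop]
  | cons c rest =>
    by_cases hc : c = '+' ∨ c = '-'
    · simp only [if_pos hc]
      rw [pv_altLoop_false]
      simp
    · simp only [if_neg hc]
      rw [pv_altLoop_false]
      simp

-- more pointwise facts about pvNorm
theorem pv_norm_comp :
    ((fun c => if c = '\'' then ('.' : Char) else c) ∘
      (fun c => if c = ',' then ('.' : Char) else c)) = pvNorm := by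
  funext c
  unfold pvNorm Function.comp
  by_cases h1 : c = ','
  · subst h1; decide
  · by_cases h2 : c = '\''
    · subst h2; decide
    · simp [h1, h2]

theorem pv_norm_sign (c a : Char) (ha : a = '+' ∨ a = '-') : pvNorm c = a ↔ c = a := by
  unfold pvNorm
  by_cases h1 : c = ','
  · subst h1
    rcases ha with rfl | rfl <;> simp <;> decide
  · by_cases h2 : c = '\''
    · subst h2
      rcases ha with rfl | rfl <;> simp [h1] <;> decide
    · simp [h1, h2]

theorem pv_sep_beq (c : Char) : (pvNorm c == '.') = pvSep c := by
  by_cases h : pvSep c = true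
  · simp [h, (pv_norm_eq_dot_iff c).mpr h]
  · have h2 : ¬ pvNorm c = '.' := fun he => h ((pv_norm_eq_dot_iff c).mp he)
    simp [h2, (by simpa using h : pvSep c = false)]

theorem pv_sep_decide (c : Char) : (decide (pvNorm c ≠ '.')) = !pvSep c := by
  have := pv_sep_beq c
  by_cases h : pvSep c = true
  · simp [h, (pv_norm_eq_dot_iff c).mpr h]
  · have h2 : ¬ pvNorm c = '.' := fun he => h ((pv_norm_eq_dot_iff c).mp he)
    simp [h2, (by simpa using h : pvSep c = false)]

-- bridge: A's double replace is map pvNorm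
theorem pv_tnorm (s : String) :
    (PySem.Str.replace (PySem.Str.replace s "," ".") "'" ".").toList
      = s.toList.map pvNorm := by
  rw [PySem.Str.toList_replace, PySem.Str.toList_replace]
  rw [show ("," : String).toList = [','] from rfl,
      show ("." : String).toList = ['.'] from rfl,
      show ("'" : String).toList = ['\''] from rfl]
  rw [pv_replace_single, pv_replace_single, List.map_map, pv_norm_comp]

theorem pv_count_map (bs : List Char) :
    (bs.map pvNorm).count '.' = bs.countP pvSep := by
  rw [List.count_eq_countP, List.countP_map]
  exact List.countP_congr (fun x _ => by
    simp only [Function.comp_apply, pv_sep_beq])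

theorem pv_mem_map_iff (bs : List Char) :
    '.' ∈ bs.map pvNorm ↔ 0 < bs.countP pvSep := by
  rw [List.mem_map]
  constructor
  · rintro ⟨a, ha, hna⟩
    rcases Nat.eq_zero_or_pos (bs.countP pvSep) with h0 | h0
    · exact absurd ((pv_norm_eq_dot_iff a).mp hna)
        (by simpa using List.countP_eq_zero.mp h0 a ha)
    · exact h0
  · intro h0
    by_contra hno
    push_neg at hno
    have : bs.countP pvSep = 0 := List.countP_eq_zero.mpr
      (fun a ha => fun hsep => hno a ha ((pv_norm_eq_dot_iff a).mpr hsep))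
    omega

theorem pv_pred_eq :
    ((fun x => decide (x ≠ '.')) ∘ pvNorm) = (fun c => !pvSep c) :=
  funext (fun c => by simpa [Function.comp] using pv_sep_decide c)

theorem pv_take_map (bs : List Char) :
    (bs.map pvNorm).takeWhile (fun x => x ≠ '.')
      = (bs.takeWhile (fun c => !pvSep c)).map pvNorm := by
  rw [List.takeWhile_map, pv_pred_eq]

theorem pv_drop_map (bs : List Char) :
    (bs.map pvNorm).dropWhile (fun x => x ≠ '.')
      = (bs.dropWhile (fun c => !pvSep c)).map pvNorm := by
  rw [List.dropWhile_map, pv_pred_eq]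

theorem pv_split1_of_not_mem (a : Char) (l : List Char) (h : a ∉ l) :
    pvSplit1 a l [] = [l] := by
  have ht : l.takeWhile (fun c => c ≠ a) = l :=
    List.takeWhile_eq_self_iff.mpr (fun x hx => by
      simp only [ne_eq, decide_eq_true_eq]
      exact fun he => h (he ▸ hx))
  rw [pv_split1_eq, if_neg h, ht]
  simp

theorem pv_dropWhile_mem (a : Char) (l : List Char) (h : a ∈ l) :
    l.dropWhile (fun x => x ≠ a) = a :: (l.dropWhile (fun x => x ≠ a)).tail := by
  induction l with
  | nil => cases h
  | cons c t ih =>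
    by_cases hc : c = a
    · subst hc; simp [List.dropWhile_cons]
    · have ht : a ∈ t := by
        rcases List.mem_cons.mp h with h' | h'
        · exact absurd h'.symm hc
        · exact h'
      simp only [List.dropWhile_cons]
      rw [if_pos (by simpa using hc)]
      exact ih ht

-- A's body after normalization and sign-stripping, as a pure list computation
theorem pv_core (bs : List Char) :
    (if bs.countP pvSep > 1 then false
     else if (bs.map pvNorm).any (fun ch => !(PySem.Chars.isdigit ch) && ch != '.') then false
     else if ((pvSplit1 '.' (bs.map pvNorm) []).headD []).length > 6 then false
     else if (pvSplit1 '.' (bs.map pvNorm) []).length > 1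
              && ((pvSplit1 '.' (bs.map pvNorm) []).getD 1 []).length > 2 then false
     else true) = true ↔ pvGood bs := by
  by_cases h1 : bs.countP pvSep > 1
  · rw [if_pos h1]
    simp only [Bool.false_eq_true, false_iff]
    rintro ⟨-, h2, -⟩
    omega
  · rw [if_neg h1]
    by_cases h2 : (bs.map pvNorm).any (fun ch => !(PySem.Chars.isdigit ch) && ch != '.') = true
    · rw [if_pos h2]
      simp only [Bool.false_eq_true, false_iff]
      rintro ⟨hall, -⟩
      obtain ⟨y, hy, hpy⟩ := List.any_eq_true.mp h2
      obtain ⟨x, hx, rfl⟩ := List.mem_map.mp hy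
      have hb := pv_norm_digit_iff x
      simp only [Bool.and_eq_true, Bool.not_eq_eq_eq_not, Bool.not_true, bne_iff_ne] at hpy
      have hlhs : (PySem.Chars.isdigit (pvNorm x) || decide (pvNorm x = '.')) = false := by
        simp [hpy.1, hpy.2]
      rw [hb] at hlhs
      rcases hall x hx with hd | hsep
      · simp [hd] at hlhs
      · simp [hsep] at hlhs
    · rw [if_neg h2]
      have h2' := List.any_eq_false.mp (Bool.eq_false_iff.mpr h2)
      have hall : ∀ x ∈ bs, PySem.Chars.isdigit x = true ∨ pvSep x = true := by
        intro x hx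
        have hpx := h2' (pvNorm x) (List.mem_map_of_mem hx)
        have hb := pv_norm_digit_iff x
        by_cases hd : PySem.Chars.isdigit x = true
        · exact Or.inl hd
        · by_cases hsep : pvSep x = true
          · exact Or.inr hsep
          · exfalso
            have : (PySem.Chars.isdigit (pvNorm x) || decide (pvNorm x = '.')) = false := by
              rw [hb]; simp [hd, hsep]
            simp only [Bool.or_eq_false_iff, decide_eq_false_iff_not] at this
            simp [this.1, this.2] at hpx
      by_cases hmem : '.' ∈ bs.map pvNorm
      · -- exactly one separator
        have hcnt1 : (bs.map pvNorm).count '.' = bs.countP pvSep := pv_count_map bs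
        have hpos : 0 < bs.countP pvSep := (pv_mem_map_iff bs).mp hmem
        have hc1 : bs.countP pvSep = 1 := by omega
        have hdrop := pv_dropWhile_mem '.' (bs.map pvNorm) hmem
        have htk0 : ((bs.map pvNorm).takeWhile (fun x => x ≠ '.')).count '.' = 0 := by
          rw [List.count_eq_zero]
          intro hmem'
          exact absurd (List.mem_takeWhile_imp hmem') (by simp)
        have hcount_es : (bs.map pvNorm).count '.'
            = ((bs.map pvNorm).takeWhile (fun x => x ≠ '.')).count '.'
              + ((bs.map pvNorm).dropWhile (fun x => x ≠ '.')).count '.' := by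
          conv_lhs => rw [← List.takeWhile_append_dropWhile
            (p := fun x => x ≠ '.') (l := bs.map pvNorm)]
          exact List.count_append
        have hdcnt : (('.' : Char) :: ((bs.map pvNorm).dropWhile (fun x => x ≠ '.')).tail).count '.'
            = (((bs.map pvNorm).dropWhile (fun x => x ≠ '.')).tail).count '.' + 1 := by
          simp [List.count_cons]
        rw [hdrop] at hcount_es
        rw [hdcnt] at hcount_es
        have htl0 : (((bs.map pvNorm).dropWhile (fun x => x ≠ '.')).tail).count '.' = 0 := by
          omega
        have htlmem : '.' ∉ ((bs.map pvNorm).dropWhile (fun x => x ≠ '.')).tail :=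
          List.count_eq_zero.mp htl0
        have hsplit1 : pvSplit1 '.' (bs.map pvNorm) []
            = [(bs.map pvNorm).takeWhile (fun x => x ≠ '.'),
               ((bs.map pvNorm).dropWhile (fun x => x ≠ '.')).tail] := by
          rw [pv_split1_eq, if_pos hmem, pv_split1_of_not_mem '.' _ htlmem,
            List.reverse_nil, List.nil_append]
        rw [hsplit1]
        have hLtk : ((bs.map pvNorm).takeWhile (fun x => x ≠ '.')).length
            = (bs.takeWhile (fun c => !pvSep c)).length := by
          rw [pv_take_map, List.length_map]
        have hLtl : (((bs.map pvNorm).dropWhile (fun x => x ≠ '.')).tail).length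
            = ((bs.dropWhile (fun c => !pvSep c)).tail).length := by
          rw [pv_drop_map]
          cases bs.dropWhile (fun c => !pvSep c) <;> simp
        rw [show ([(bs.map pvNorm).takeWhile (fun x => x ≠ '.'),
              ((bs.map pvNorm).dropWhile (fun x => x ≠ '.')).tail].headD [])
            = (bs.map pvNorm).takeWhile (fun x => x ≠ '.') from rfl,
          show ([(bs.map pvNorm).takeWhile (fun x => x ≠ '.'),
              ((bs.map pvNorm).dropWhile (fun x => x ≠ '.')).tail].getD 1 [])
            = ((bs.map pvNorm).dropWhile (fun x => x ≠ '.')).tail from rfl,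
          show ([(bs.map pvNorm).takeWhile (fun x => x ≠ '.'),
              ((bs.map pvNorm).dropWhile (fun x => x ≠ '.')).tail].length) = 2 from rfl]
        by_cases h6 : ((bs.map pvNorm).takeWhile (fun x => x ≠ '.')).length > 6
        · rw [if_pos h6]
          simp only [Bool.false_eq_true, false_iff]
          rintro ⟨-, -, h3, -⟩
          omega
        · rw [if_neg h6]
          by_cases h22 : (((bs.map pvNorm).dropWhile (fun x => x ≠ '.')).tail).length > 2
          · have hcond : (decide (2 > 1)
                && decide ((((bs.map pvNorm).dropWhile (fun x => x ≠ '.')).tail).length > 2))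
                = true := by rw [decide_eq_true h22]; rfl
            rw [if_pos hcond]
            simp only [Bool.false_eq_true, false_iff]
            rintro ⟨-, -, -, h4⟩
            omega
          · have hcond : (decide (2 > 1)
                && decide ((((bs.map pvNorm).dropWhile (fun x => x ≠ '.')).tail).length > 2))
                = false := by rw [decide_eq_false h22]; rfl
            rw [if_neg (by rw [hcond]; simp)]
            simp only [true_iff]
            exact ⟨hall, by omega, by omega, by omega⟩
      · -- no separator at all
        have h0 : bs.countP pvSep = 0 := by
          rcases Nat.eq_zero_or_pos (bs.countP pvSep) with h | h
          · exact h
          · exact absurd ((pv_mem_map_iff bs).mpr h) hmem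
        have hsplit1 : pvSplit1 '.' (bs.map pvNorm) [] = [bs.map pvNorm] :=
          pv_split1_of_not_mem '.' _ hmem
        rw [hsplit1]
        have htkbs : bs.takeWhile (fun c => !pvSep c) = bs :=
          List.takeWhile_eq_self_iff.mpr
            (fun x hx => by simp [List.countP_eq_zero.mp h0 x hx])
        have hdrbs : bs.dropWhile (fun c => !pvSep c) = [] := by
          rw [List.dropWhile_eq_nil_iff]
          intro x hx
          simp [List.countP_eq_zero.mp h0 x hx]
        by_cases h6 : (bs.map pvNorm).length > 6
        · rw [if_pos (by simpa using h6)]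
          simp only [Bool.false_eq_true, false_iff]
          rintro ⟨-, -, h3, -⟩
          rw [htkbs] at h3
          simp only [List.length_map] at h6
          omega
        · rw [if_neg (by simpa using h6)]
          rw [if_neg (by simp)]
          simp only [true_iff]
          refine ⟨hall, by omega, ?_, ?_⟩
          · rw [htkbs]
            simpa using h6
          · rw [hdrbs]
            simp

-- pvSep is false on sign characters
theorem pv_sign_not_sep (c : Char) (h : c = '+' ∨ c = '-') : pvSep c = false := by
  rcases h with rfl | rfl <;> decide

-- A = true iff pvGood of the sign-stripped list (main A-side characterization)
theorem pv_a_iff (s : String) :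
    validar_pulsacion s = true ↔
      pvGood (match s.toList with
              | [] => ([] : List Char)
              | c :: rest => if c = '+' ∨ c = '-' then rest else c :: rest) := by
  by_cases hsp : s = "" ∨ s = "+" ∨ s = "-"
  · unfold validar_pulsacion
    rw [if_pos hsp]
    rcases hsp with rfl | rfl | rfl
    · rw [show ("" : String).toList = [] from rfl]
      simp [pvGood]
    · rw [show ("+" : String).toList = ['+'] from rfl]
      show true = true ↔ pvGood (if '+' = '+' ∨ '+' = '-' then [] else ['+'])
      rw [if_pos (Or.inl rfl)]
      simp [pvGood]
    · rw [show ("-" : String).toList = ['-'] from rfl]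
      show true = true ↔ pvGood (if '-' = '+' ∨ '-' = '-' then [] else ['-'])
      rw [if_pos (Or.inr rfl)]
      simp [pvGood]
  · cases hcs : s.toList with
    | nil =>
      exact absurd (String.toList_inj.mp (hcs.trans rfl)) (fun h => hsp (Or.inl h))
    | cons c rest =>
      have htn : (PySem.Str.replace (PySem.Str.replace s "," ".") "'" ".").toList
          = (c :: rest).map pvNorm := by rw [pv_tnorm, hcs]
      have hcount : PySem.Str.count (PySem.Str.replace (PySem.Str.replace s "," ".") "'" ".") "."
          = (c :: rest).countP pvSep := by
        rw [PySem.Str.count_eq, htn, show ("." : String).toList = ['.'] from rfl,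
          pv_count_single, pv_count_map]
      have hsw : ∀ a : Char, a = '+' ∨ a = '-' →
          PySem.Chars.startswith ((c :: rest).map pvNorm) [a] = decide (c = a) := by
        intro a ha
        by_cases hc' : c = a
        · rw [decide_eq_true hc']
          rw [PySem.Chars.startswith_iff, List.map_cons, List.cons_prefix_cons]
          exact ⟨((pv_norm_sign c a ha).mpr hc').symm, List.nil_prefix⟩
        · rw [decide_eq_false hc']
          apply Bool.eq_false_iff.mpr
          intro hpre
          rw [PySem.Chars.startswith_iff, List.map_cons, List.cons_prefix_cons] at hpre
          exact hc' ((pv_norm_sign c a ha).mp hpre.1.symm)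
      have hA : validar_pulsacion s =
          (if s = "" ∨ s = "+" ∨ s = "-" then true
           else if PySem.Str.count (PySem.Str.replace (PySem.Str.replace s "," ".") "'" ".") "." > 1 then false
           else if (if (PySem.Str.startswith (PySem.Str.replace (PySem.Str.replace s "," ".") "'" ".") "+" || PySem.Str.startswith (PySem.Str.replace (PySem.Str.replace s "," ".") "'" ".") "-") = true then PySem.Str.slice (PySem.Str.replace (PySem.Str.replace s "," ".") "'" ".") (some 1) none else (PySem.Str.replace (PySem.Str.replace s "," ".") "'" ".")).toList.any (fun char => !(PySem.Chars.isdigit char) && char != '.') then false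
           else if ((PySem.Chars.splitOn (if (PySem.Str.startswith (PySem.Str.replace (PySem.Str.replace s "," ".") "'" ".") "+" || PySem.Str.startswith (PySem.Str.replace (PySem.Str.replace s "," ".") "'" ".") "-") = true then PySem.Str.slice (PySem.Str.replace (PySem.Str.replace s "," ".") "'" ".") (some 1) none else (PySem.Str.replace (PySem.Str.replace s "," ".") "'" ".")).toList ['.']).headD []).length > 6 then false
           else if (PySem.Chars.splitOn (if (PySem.Str.startswith (PySem.Str.replace (PySem.Str.replace s "," ".") "'" ".") "+" || PySem.Str.startswith (PySem.Str.replace (PySem.Str.replace s "," ".") "'" ".") "-") = true then PySem.Str.slice (PySem.Str.replace (PySem.Str.replace s "," ".") "'" ".") (some 1) none else (PySem.Str.replace (PySem.Str.replace s "," ".") "'" ".")).toList ['.']).length > 1 && ((PySem.Chars.splitOn (if (PySem.Str.startswith (PySem.Str.replace (PySem.Str.replace s "," ".") "'" ".") "+" || PySem.Str.startswith (PySem.Str.replace (PySem.Str.replace s "," ".") "'" ".") "-") = true then PySem.Str.slice (PySem.Str.replace (PySem.Str.replace s "," ".") "'" ".") (some 1) none else (PySem.Str.replace (PySem.Str.replace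 s "," ".") "'" ".")).toList ['.']).getD 1 []).length > 2 then false
           else true) := rfl
      rw [hA, if_neg hsp]
      rw [show (match c :: rest with
            | [] => ([] : List Char)
            | c :: rest => if c = '+' ∨ c = '-' then rest else c :: rest)
          = (if c = '+' ∨ c = '-' then rest else c :: rest) from rfl]
      by_cases hsign : c = '+' ∨ c = '-'
      · have hcond : (PySem.Str.startswith
              (PySem.Str.replace (PySem.Str.replace s "," ".") "'" ".") "+"
            || PySem.Str.startswith
              (PySem.Str.replace (PySem.Str.replace s "," ".") "'" ".") "-") = true := by
          rw [PySem.Str.startswith_eq, PySem.Str.startswith_eq, htn,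
            show ("+" : String).toList = ['+'] from rfl,
            show ("-" : String).toList = ['-'] from rfl,
            hsw '+' (Or.inl rfl), hsw '-' (Or.inr rfl)]
          rcases hsign with rfl | rfl <;> simp
        have hsepc : pvSep c = false := pv_sign_not_sep c hsign
        have hcount' : (c :: rest).countP pvSep = rest.countP pvSep :=
          List.countP_cons_of_neg (by simp [hsepc])
        have hteval : (PySem.Str.slice
            (PySem.Str.replace (PySem.Str.replace s "," ".") "'" ".") (some 1) none).toList
            = rest.map pvNorm := by
          rw [PySem.Str.toList_slice, PySem.Chars.slice_eq_listSlice, htn,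
            PySem.List.slice_from_one, List.map_cons, List.tail_cons]
        rw [hcount, hcond, if_pos rfl, hteval, hcount', pv_splitOn_single, if_pos hsign]
        exact pv_core rest
      · have hcond : (PySem.Str.startswith
              (PySem.Str.replace (PySem.Str.replace s "," ".") "'" ".") "+"
            || PySem.Str.startswith
              (PySem.Str.replace (PySem.Str.replace s "," ".") "'" ".") "-") = false := by
          rw [PySem.Str.startswith_eq, PySem.Str.startswith_eq, htn,
            show ("+" : String).toList = ['+'] from rfl,
            show ("-" : String).toList = ['-'] from rfl,
            hsw '+' (Or.inl rfl), hsw '-' (Or.inr rfl)]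
          simp only [Bool.or_eq_false_iff, decide_eq_false_iff_not]
          exact ⟨fun h => hsign (Or.inl h), fun h => hsign (Or.inr h)⟩
        rw [hcount, hcond]
        simp only [Bool.false_eq_true, if_false]
        rw [htn, pv_splitOn_single, if_neg hsign]
        exact pv_core (c :: rest)

theorem validar_pulsacion_spec_aux (s : String) :
    validar_pulsacion s = validar_pulsacion_alt s :=
  Bool.eq_iff_iff.mpr ((pv_a_iff s).trans (pv_alt_iff s).symm)

-- ===== VERDICT (by name: the statement is the Claim_ definition above) =====
theorem validar_pulsacion_spec : Claim_equal_validar_pulsacion := by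
  intro s _
  unfold Spec_validar_pulsacion
  exact validar_pulsacion_spec_aux s
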